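-- pv_equiv track=rewrite | github.com/thefronge/adventofcode2020 | day4.py | validate_passportid
-- ===== SOURCE A (Python) =====
-- def validate_passportid(passportid: str) -> bool:
--     valid_characters = ["0", "1", "2", "3", "4", "5", "6", "7", "8", "9"]
--
--     for character in passportid:
--         if character in valid_characters:
--             continue
--         else:
--             return False
--     if len(passportid) == 9:
--         return True
--     else:
--         return False
-- ===== SOURCE B (Python) =====
-- import re
--
-- def validate_passportid(passportid: str) -> bool:
--     return bool(re.fullmatch(r"[0-9]{9}", passportid))
-- ===== Notes on version B (the rewrite author's own statement) =====
-- stated objective: idiomatic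
-- what changed: Replaced the explicit character loop with early return plus a separate length check by a single anchored ASCII regex full-match [0-9]{9}.
import Mathlib
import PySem

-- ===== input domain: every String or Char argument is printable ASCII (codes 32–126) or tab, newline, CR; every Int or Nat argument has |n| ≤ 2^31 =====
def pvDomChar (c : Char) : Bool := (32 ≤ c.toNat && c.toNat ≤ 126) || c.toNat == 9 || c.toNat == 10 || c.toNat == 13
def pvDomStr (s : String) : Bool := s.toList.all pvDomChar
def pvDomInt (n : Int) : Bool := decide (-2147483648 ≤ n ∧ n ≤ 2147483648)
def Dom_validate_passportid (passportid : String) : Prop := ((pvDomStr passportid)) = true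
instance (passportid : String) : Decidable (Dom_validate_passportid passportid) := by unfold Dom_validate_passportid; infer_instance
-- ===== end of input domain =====

-- B replaces A's explicit character loop (early return) plus separate length check by a
-- single anchored ASCII regex full-match re.fullmatch(r"[0-9]{9}", ...) — more idiomatic, same cost.


-- ===== PORT A =====
-- the loop: return False at the first character not in valid_characters; after the loop,
-- return (len(passportid) == 9). `len` is carried as the (unchanged) full length.
def validate_passportid_loop (cs : List Char) (len : Nat) : Bool :=
  match cs with
  | [] => len == 9
  | c :: rest =>
      if ['0', '1', '2', '3', '4', '5', '6', '7', '8', '9'].contains c then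
        validate_passportid_loop rest len
      else
        false

def validate_passportid (passportid : String) : Bool :=
  validate_passportid_loop passportid.toList passportid.toList.length

-- ===== PORT B =====
-- port of bool(re.fullmatch(r"[0-9]{9}", passportid)): the anchored automaton accepts exactly
-- the strings of length 9 whose every character lies in the ASCII class [0-9]; exact on all inputs.
def validate_passportid_alt (passportid : String) : Bool :=
  passportid.toList.length == 9 && passportid.toList.all (fun c => '0' ≤ c && c ≤ '9')

-- ===== PRECONDITION & SPEC =====
def Spec_validate_passportid (passportid : String) (out : Bool) : Prop := out = validate_passportid_alt passportid
instance (passportid : String) (out : Bool) : Decidable (Spec_validate_passportid passportid out) := by unfold Spec_validate_passportid; infer_instance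

-- ===== CLAIM (what is proved, stated in full; the proofs are below) =====
def Claim_equal_validate_passportid : Prop := ∀ (passportid : String), Dom_validate_passportid passportid → Spec_validate_passportid passportid (validate_passportid passportid)

-- ===== LEMMAS AND PROOFS =====

-- A's membership test in the list of digit strings agrees with B's ASCII interval test.
theorem digits_contains_eq (c : Char) :
    (['0', '1', '2', '3', '4', '5', '6', '7', '8', '9'].contains c)
      = ('0' ≤ c && c ≤ '9') := by
  have h : ∀ d : Char, d.val.toNat = d.toNat := fun _ => rfl
  rw [Bool.eq_iff_iff]
  simp only [List.contains_cons, List.contains_nil, Bool.or_false, Bool.or_eq_true,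
    beq_iff_eq, Bool.and_eq_true, decide_eq_true_eq, Char.le_def, Char.ext_iff,
    UInt32.le_iff_toNat_le, UInt32.ext_iff, h]
  have h0 : ('0':Char).toNat = 48 := rfl
  have h1 : ('1':Char).toNat = 49 := rfl
  have h2 : ('2':Char).toNat = 50 := rfl
  have h3 : ('3':Char).toNat = 51 := rfl
  have h4 : ('4':Char).toNat = 52 := rfl
  have h5 : ('5':Char).toNat = 53 := rfl
  have h6 : ('6':Char).toNat = 54 := rfl
  have h7 : ('7':Char).toNat = 55 := rfl
  have h8 : ('8':Char).toNat = 56 := rfl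
  have h9 : ('9':Char).toNat = 57 := rfl
  omega

-- Loop characterisation: A's early-return loop over cs with carried length n
-- computes "all digits" AND "n = 9".
theorem loop_eq (cs : List Char) (n : Nat) :
    validate_passportid_loop cs n
      = (cs.all (fun c => '0' ≤ c && c ≤ '9') && (n == 9)) := by
  induction cs with
  | nil => simp [validate_passportid_loop]
  | cons c rest ih =>
      rw [validate_passportid_loop]
      rw [digits_contains_eq c]
      by_cases hc : ('0' ≤ c && c ≤ '9') = true
      · simp [hc, ih, List.all_cons]
      · simp only [Bool.not_eq_true] at hc
        simp [hc, List.all_cons]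

-- ===== VERDICT (by name: the statement is the Claim_ definition above) =====
theorem validate_passportid_spec : Claim_equal_validate_passportid := by
  intro p _
  unfold Spec_validate_passportid validate_passportid validate_passportid_alt
  rw [loop_eq]
  rw [Bool.and_comm]
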